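-- pv_equiv track=rewrite | github.com/posei-don1/Dynamic-Agent-System | app/graph/nodes/suggestion_node.py | _create_implementation_timeline
-- ===== SOURCE A (Python) =====
-- from typing import Dict, Any, List, Optional
--
-- def _create_implementation_timeline(suggestions: List[Dict[str, Any]]) -> Dict[str, List[str]]:
--     """Create implementation timeline"""
--     timeline = {
--         'week_1': [],
--         'month_1': [],
--         'quarter_1': [],
--         'ongoing': []
--     }
--
--     for suggestion in suggestions:
--         title = suggestion.get('title', 'Suggestion')
--
--         if suggestion.get('priority') == 'high':
--             timeline['week_1'].append(title)
--         elif suggestion.get('priority') == 'medium':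
--             timeline['month_1'].append(title)
--         else:
--             timeline['quarter_1'].append(title)
--
--     timeline['ongoing'] = ['Monitor progress', 'Collect feedback', 'Adjust strategies']
--
--     return timeline
-- ===== SOURCE B (Python) =====
-- def _create_implementation_timeline(suggestions):
--     """Create implementation timeline: one filtered comprehension per bucket."""
--     return {
--         'week_1': [s.get('title', 'Suggestion') for s in suggestions
--                    if s.get('priority') == 'high'],
--         'month_1': [s.get('title', 'Suggestion') for s in suggestions
--                     if s.get('priority') == 'medium'],
--         'quarter_1': [s.get('title', 'Suggestion') for s in suggestions
--                       if s.get('priority') not in ('high', 'medium')],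
--         'ongoing': ['Monitor progress', 'Collect feedback', 'Adjust strategies'],
--     }
-- ===== Notes on version B (the rewrite author's own statement) =====
-- stated objective: alternative
-- what changed: Replaces the single mutating bucketing loop over a pre-built dict with a dict literal built from three independent filtered comprehensions (one scan per bucket) and a constant 'ongoing' list.
import Mathlib
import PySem

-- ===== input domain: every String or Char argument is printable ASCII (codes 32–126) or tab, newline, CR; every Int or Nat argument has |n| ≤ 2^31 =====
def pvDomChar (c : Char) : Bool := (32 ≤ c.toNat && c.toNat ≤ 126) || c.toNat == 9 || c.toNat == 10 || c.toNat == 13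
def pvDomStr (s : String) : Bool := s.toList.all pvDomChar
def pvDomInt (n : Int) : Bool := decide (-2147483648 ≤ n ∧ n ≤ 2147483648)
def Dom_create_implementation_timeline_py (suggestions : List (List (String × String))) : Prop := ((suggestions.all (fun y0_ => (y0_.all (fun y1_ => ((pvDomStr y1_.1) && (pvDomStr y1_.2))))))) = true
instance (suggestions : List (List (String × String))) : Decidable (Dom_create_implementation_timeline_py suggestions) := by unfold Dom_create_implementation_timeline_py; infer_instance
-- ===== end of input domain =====

-- B builds the timeline from three independent filtered scans instead of A's single mutating bucketing loop (alternative decomposition).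
-- ===== PORT A =====
-- one loop iteration: title = s.get('title','Suggestion'); append to the bucket chosen by s.get('priority')
def pvStepA (d : PySem.Dict String (List String)) (s : List (String × String)) : PySem.Dict String (List String) :=
  let title := (PySem.Dict.mk s).getD "title" "Suggestion"
  if (PySem.Dict.mk s).get? "priority" == some "high" then
    d.modify "week_1" [] (fun l => l ++ [title])
  else if (PySem.Dict.mk s).get? "priority" == some "medium" then
    d.modify "month_1" [] (fun l => l ++ [title])
  else
    d.modify "quarter_1" [] (fun l => l ++ [title])

def create_implementation_timeline_py (suggestions : List (List (String × String))) : List (String × List String) :=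
  let timeline : PySem.Dict String (List String) :=
    PySem.Dict.ofList [("week_1", []), ("month_1", []), ("quarter_1", []), ("ongoing", [])]
  let timeline := suggestions.foldl pvStepA timeline
  let timeline := timeline.insert "ongoing" ["Monitor progress", "Collect feedback", "Adjust strategies"]
  timeline.items

-- ===== PORT B =====
def pvTitle (s : List (String × String)) : String := (PySem.Dict.mk s).getD "title" "Suggestion"
def pvPrio (s : List (String × String)) : Option String := (PySem.Dict.mk s).get? "priority"

def create_implementation_timeline_py_alt (suggestions : List (List (String × String))) : List (String × List String) :=
  [ ("week_1",    (suggestions.filter (fun s => pvPrio s == some "high")).map pvTitle),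
    ("month_1",   (suggestions.filter (fun s => pvPrio s == some "medium")).map pvTitle),
    ("quarter_1", (suggestions.filter (fun s => !(pvPrio s == some "high" || pvPrio s == some "medium"))).map pvTitle),
    ("ongoing",   ["Monitor progress", "Collect feedback", "Adjust strategies"]) ]

-- ===== PRECONDITION & SPEC =====
def Spec_create_implementation_timeline_py (suggestions : List (List (String × String))) (out : List (String × List String)) : Prop := out = create_implementation_timeline_py_alt suggestions
instance (suggestions : List (List (String × String))) (out : List (String × List String)) : Decidable (Spec_create_implementation_timeline_py suggestions out) := by unfold Spec_create_implementation_timeline_py; infer_instance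

-- ===== CLAIM (what is proved, stated in full; the proofs are below) =====
def Claim_equal_create_implementation_timeline_py : Prop := ∀ (suggestions : List (List (String × String))), Dom_create_implementation_timeline_py suggestions → Spec_create_implementation_timeline_py suggestions (create_implementation_timeline_py suggestions)

-- ===== LEMMAS AND PROOFS =====

lemma pv_fold_eq (l : List (List (String × String))) (w m q o : List String) :
    l.foldl pvStepA (PySem.Dict.mk [("week_1", w), ("month_1", m), ("quarter_1", q), ("ongoing", o)]) =
    PySem.Dict.mk [("week_1", w ++ (l.filter (fun s => pvPrio s == some "high")).map pvTitle),
      ("month_1", m ++ (l.filter (fun s => pvPrio s == some "medium")).map pvTitle),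
      ("quarter_1", q ++ (l.filter (fun s => !(pvPrio s == some "high" || pvPrio s == some "medium"))).map pvTitle),
      ("ongoing", o)] := by
  induction l generalizing w m q with
  | nil => simp
  | cons s t ih =>
    simp only [List.foldl_cons, pvStepA, List.filter_cons]
    rw [show (PySem.Dict.mk s).get? "priority" = pvPrio s from rfl,
        show (PySem.Dict.mk s).getD "title" "Suggestion" = pvTitle s from rfl]
    by_cases h1 : (pvPrio s == some "high") = true
    · have hh : pvPrio s = some "high" := by simpa using h1
      simp [hh, PySem.Dict.modify, PySem.Dict.contains, PySem.Dict.get?, PySem.Dict.getD,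
        PySem.Dict.insert, List.find?, ih]
    · by_cases h2 : (pvPrio s == some "medium") = true
      · have hh : pvPrio s = some "medium" := by simpa using h2
        simp [hh, PySem.Dict.modify, PySem.Dict.contains, PySem.Dict.get?, PySem.Dict.getD,
          PySem.Dict.insert, List.find?, ih]
      · simp [h1, h2, PySem.Dict.modify, PySem.Dict.contains, PySem.Dict.get?, PySem.Dict.getD,
          PySem.Dict.insert, List.find?, ih]

-- ===== VERDICT (by name: the statement is the Claim_ definition above) =====
theorem create_implementation_timeline_py_spec : Claim_equal_create_implementation_timeline_py := by
  intro suggestions _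
  unfold Spec_create_implementation_timeline_py create_implementation_timeline_py
    create_implementation_timeline_py_alt
  simp only [PySem.Dict.ofList]
  rw [show (PySem.Dict.empty.update [("week_1", ([]:List String)), ("month_1", []), ("quarter_1", []), ("ongoing", [])]) =
      PySem.Dict.mk [("week_1", []), ("month_1", []), ("quarter_1", []), ("ongoing", [])] from by rfl]
  rw [pv_fold_eq]
  simp [PySem.Dict.insert, PySem.Dict.contains, PySem.Dict.items, List.find?]
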